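-- pv_equiv track=rewrite | github.com/quoctruong247/hoc_ky_he | python/bt_ki_nang.py | tongCT
-- ===== SOURCE A (Python) =====
-- def tongCT(num):
--     numl=numtemp=tong9=0
--     while num:
--         numl = int(num % 10)
--         num=int(num / 10)
--         numtemp=int(num % 10)
--         num=int(num / 10)
--         if int(num % 10)<numtemp>numl or int(num % 10)>numtemp<numl:
--             tong9+=numtemp
--     return tong9
-- ===== SOURCE B (Python) =====
-- def tongCT(num):
--     # Phase 1: extract digits least-significant-first (same ops as the task uses).
--     d = []
--     while num:
--         d.append(int(num % 10))
--         num = int(num / 10)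
--     # Phase 2: every odd index is a "center"; its right neighbor defaults to 0.
--     total = 0
--     for j in range(1, len(d), 2):
--         left = d[j - 1]
--         center = d[j]
--         right = d[j + 1] if j + 1 < len(d) else 0
--         if right < center > left or right > center < left:
--             total += center
--     return total
-- ===== Notes on version B (the rewrite author's own statement) =====
-- stated objective: simpler
-- what changed: A's single interleaved loop that consumes two digits per iteration while streaming the comparison is replaced by a two-phase approach: first extract the digit list least-significant-first, then one indexed pass over the odd positions summing centers that are strict local extrema (missing right neighbour = 0).
import Mathlib
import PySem

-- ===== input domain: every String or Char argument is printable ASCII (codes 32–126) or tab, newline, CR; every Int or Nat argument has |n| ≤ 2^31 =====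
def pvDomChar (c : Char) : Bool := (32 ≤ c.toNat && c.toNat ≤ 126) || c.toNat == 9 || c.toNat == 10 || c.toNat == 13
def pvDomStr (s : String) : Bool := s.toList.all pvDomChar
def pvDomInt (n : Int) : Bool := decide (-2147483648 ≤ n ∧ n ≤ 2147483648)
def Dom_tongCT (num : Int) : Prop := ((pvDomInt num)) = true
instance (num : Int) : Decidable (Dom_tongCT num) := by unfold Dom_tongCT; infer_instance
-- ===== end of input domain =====

-- B replaces A's interleaved two-digits-per-iteration streaming scan by a two-phase
-- extract-digits-then-index pass; objective: simpler (no speed claim).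
-- 'int(num / 10)' is ported as Int.tdiv (truncation toward zero): exact for |num| ≤ 2^31,
-- where Python's float division rounds to a value with the same truncation.

-- ===== PORT A =====
def tongCTAux (num tong9 : Int) : Int :=
  if _h : num = 0 then tong9
  else
    let numl := PySem.Int.mod num 10
    let num1 := num.tdiv 10
    let numtemp := PySem.Int.mod num1 10
    let num2 := num1.tdiv 10
    tongCTAux num2
      (if (PySem.Int.mod num2 10 < numtemp ∧ numtemp > numl) ∨
          (PySem.Int.mod num2 10 > numtemp ∧ numtemp < numl)
       then tong9 + numtemp else tong9)
termination_by num.natAbs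
decreasing_by
  rw [Int.natAbs_tdiv, Int.natAbs_tdiv]
  have h1 : num.natAbs / 10 / 10 ≤ num.natAbs / 10 := Nat.div_le_self _ _
  have h2 : num.natAbs / 10 < num.natAbs :=
    Nat.div_lt_self (by omega) (by norm_num)
  simpa using Nat.lt_of_le_of_lt h1 h2

def tongCT (num : Int) : Int := tongCTAux num 0

-- ===== PORT B =====
-- Phase 1 of Source B: the digit list, least-significant digit first.
def pvDigits (num : Int) : List Int :=
  if _h : num = 0 then []
  else PySem.Int.mod num 10 :: pvDigits (num.tdiv 10)
termination_by num.natAbs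
decreasing_by
  rw [Int.natAbs_tdiv]
  exact Nat.div_lt_self (by omega) (by norm_num)

-- Loop body of Source B's phase-2 'for j in range(1, len(d), 2)'.
-- d[j-1] and d[j] are always in range for j drawn from that range, so pyGetD is exact there.
def pvAltStep (d : List Int) (total j : Int) : Int :=
  let left := PySem.List.pyGetD d (j - 1) 0
  let center := PySem.List.pyGetD d j 0
  let right := if j + 1 < (d.length : Int) then PySem.List.pyGetD d (j + 1) 0 else 0
  if (right < center ∧ center > left) ∨ (right > center ∧ center < left)
  then total + center else total

def tongCT_alt (num : Int) : Int :=
  let d := pvDigits num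
  (PySem.List.pyRange 1 (d.length : Int) 2).foldl (pvAltStep d) 0

-- ===== PRECONDITION & SPEC =====
def Spec_tongCT (num : Int) (out : Int) : Prop := out = tongCT_alt num
instance (num : Int) (out : Int) : Decidable (Spec_tongCT num out) := by unfold Spec_tongCT; infer_instance

-- ===== CLAIM (what is proved, stated in full; the proofs are below) =====
def Claim_equal_tongCT : Prop := ∀ (num : Int), Dom_tongCT num → Spec_tongCT num (tongCT num)

-- ===== LEMMAS AND PROOFS =====

-- The common value: sum of the odd-position digits that are strict local extrema
-- (missing right neighbour counts as 0).
def pvOddSum : List Int → Int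
  | [] => 0
  | [_] => 0
  | a :: b :: rest =>
      (if (rest.headD 0 < b ∧ b > a) ∨ (rest.headD 0 > b ∧ b < a) then b else 0) + pvOddSum rest

theorem pvDigits_headD (n : Int) : (pvDigits n).headD 0 = PySem.Int.mod n 10 := by
  rw [pvDigits]
  split
  · rename_i h; subst h; decide
  · simp

theorem pvGetD_shift2 (a b x : Int) (rest : List Int) (n : Nat) :
    PySem.List.pyGetD (a :: b :: rest) ((n : Int) + 2) x = PySem.List.pyGetD rest (n : Int) x := by
  have e : ((n : Int) + 2) = ((n + 2 : Nat) : Int) := by push_cast; ring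
  rw [e, PySem.List.pyGetD_natCast, PySem.List.pyGetD_natCast]
  simp

theorem pvAltStep_shift (a b : Int) (rest : List Int) (acc : Int) (k : Nat) :
    pvAltStep (a :: b :: rest) acc (1 + 2 * ((k : Int) + 1)) = pvAltStep rest acc (1 + 2 * (k : Int)) := by
  unfold pvAltStep
  have e1 : (1 : Int) + 2 * ((k : Int) + 1) - 1 = ((2 * k : Nat) : Int) + 2 := by push_cast; ring
  have e2 : (1 : Int) + 2 * ((k : Int) + 1) = ((2 * k + 1 : Nat) : Int) + 2 := by push_cast; ring
  have e3 : (1 : Int) + 2 * ((k : Int) + 1) + 1 = ((2 * k + 2 : Nat) : Int) + 2 := by push_cast; ring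
  have f1 : (1 : Int) + 2 * (k : Int) - 1 = ((2 * k : Nat) : Int) := by push_cast; ring
  have f2 : (1 : Int) + 2 * (k : Int) = ((2 * k + 1 : Nat) : Int) := by push_cast; ring
  have f3 : (1 : Int) + 2 * (k : Int) + 1 = ((2 * k + 2 : Nat) : Int) := by push_cast; ring
  rw [e1, e3, e2, f1, f3, f2, pvGetD_shift2, pvGetD_shift2, pvGetD_shift2]
  have hlen : (((2 * k + 2 : Nat) : Int) + 2 < ((a :: b :: rest).length : Int)) ↔
      (((2 * k + 2 : Nat) : Int) < (rest.length : Int)) := by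
    simp; omega
  simp only [hlen]

theorem pvFoldB : ∀ (n : Nat) (d : List Int), d.length = n → ∀ total : Int,
    (List.range (d.length / 2)).foldl (fun (acc : Int) (k : Nat) => pvAltStep d acc (1 + 2 * (k : Int))) total
      = total + pvOddSum d := by
  intro n
  induction n using Nat.strong_induction_on with
  | _ n ih =>
    intro d hlen total
    match d with
    | [] => simp [pvOddSum]
    | [a] => simp [pvOddSum]
    | a :: b :: rest =>
      have hl2 : (a :: b :: rest).length / 2 = rest.length / 2 + 1 := by simp; omega
      rw [hl2, List.range_succ_eq_map, List.foldl_cons, List.foldl_map]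
      have hstep : (fun (acc : Int) (k : Nat) => pvAltStep (a :: b :: rest) acc (1 + 2 * ((k.succ : Nat) : Int)))
          = fun (acc : Int) (k : Nat) => pvAltStep rest acc (1 + 2 * (k : Int)) := by
        funext acc k
        have : ((k.succ : Nat) : Int) = (k : Int) + 1 := by push_cast; ring
        rw [this, pvAltStep_shift]
      rw [hstep]
      have hrest : rest.length < n := by omega
      rw [ih rest.length hrest rest rfl]
      -- the first iteration (j = 1) contributes the head pair's term
      have hfirst : pvAltStep (a :: b :: rest) total (1 + 2 * ((0 : Nat) : Int))
          = total + (if (rest.headD 0 < b ∧ b > a) ∨ (rest.headD 0 > b ∧ b < a) then b else 0) := by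
        unfold pvAltStep
        have g0 : (1 : Int) + 2 * ((0 : Nat) : Int) - 1 = ((0 : Nat) : Int) := by norm_num
        have g1 : (1 : Int) + 2 * ((0 : Nat) : Int) = ((1 : Nat) : Int) := by norm_num
        have g2 : (1 : Int) + 2 * ((0 : Nat) : Int) + 1 = ((2 : Nat) : Int) := by norm_num
        rw [g0, g2, g1, PySem.List.pyGetD_natCast, PySem.List.pyGetD_natCast,
          PySem.List.pyGetD_natCast]
        have hr : (if (((2 : Nat) : Int) < ((a :: b :: rest).length : Int))
              then (a :: b :: rest).getD 2 0 else 0) = rest.headD 0 := by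
          cases rest with
          | nil => simp
          | cons c cs => simp
        simp only [List.getD_cons_succ, List.getD_cons_zero] at hr ⊢
        rw [hr]
        split <;> simp
      rw [hfirst, pvOddSum]
      ring

theorem pvAlt_eq (num : Int) : tongCT_alt num = pvOddSum (pvDigits num) := by
  show (PySem.List.pyRange 1 (((pvDigits num).length : Nat) : Int) 2).foldl (pvAltStep (pvDigits num)) 0
      = pvOddSum (pvDigits num)
  rw [PySem.List.pyRange_of_pos _ _ (by norm_num : (0:Int) < 2), List.foldl_map]
  have hM : (if (1 : Int) < ((pvDigits num).length : Int)
      then ((((pvDigits num).length : Int) - 1 + 2 - 1) / 2).toNat else 0)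
      = (pvDigits num).length / 2 := by split <;> omega
  rw [hM]
  have := pvFoldB (pvDigits num).length (pvDigits num) rfl 0
  simpa using this

theorem pvTdiv_natAbs_lt (num : Int) (h : num ≠ 0) : (num.tdiv 10).natAbs < num.natAbs := by
  rw [Int.natAbs_tdiv]
  exact Nat.div_lt_self (by omega) (by norm_num)

theorem pvA_eq : ∀ (n : Nat) (num : Int), num.natAbs = n →
    ∀ tong9 : Int, tongCTAux num tong9 = tong9 + pvOddSum (pvDigits num) := by
  intro n
  induction n using Nat.strong_induction_on with
  | _ n ih =>
    intro num hn tong9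
    by_cases h : num = 0
    · subst h; rw [tongCTAux, pvDigits]; simp [pvOddSum]
    · rw [tongCTAux, pvDigits]
      simp only [dif_neg h]
      have hlt1 : (num.tdiv 10).natAbs < n := hn ▸ pvTdiv_natAbs_lt num h
      have hlt2 : ((num.tdiv 10).tdiv 10).natAbs < n :=
        Nat.lt_of_le_of_lt (by rw [Int.natAbs_tdiv]; exact Nat.div_le_self _ _) hlt1
      rw [ih _ hlt2 ((num.tdiv 10).tdiv 10) rfl]
      by_cases h1 : num.tdiv 10 = 0
      · -- after the first division num is 0: numtemp = 0, the guard cannot fire, loop ends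
        rw [h1]
        rw [show pvDigits (0 : Int) = [] from by rw [pvDigits]; simp]
        rw [show Int.tdiv 0 10 = 0 from by decide]
        rw [show pvDigits (0 : Int) = [] from by rw [pvDigits]; simp]
        rw [show PySem.Int.mod 0 10 = 0 from by decide]
        simp [pvOddSum]
      · have hd1 : pvDigits (num.tdiv 10)
            = PySem.Int.mod (num.tdiv 10) 10 :: pvDigits ((num.tdiv 10).tdiv 10) := by
          rw [pvDigits]; simp [h1]
        rw [hd1, pvOddSum, pvDigits_headD]
        split <;> ring

-- ===== VERDICT (by name: the statement is the Claim_ definition above) =====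
theorem tongCT_spec : Claim_equal_tongCT := by
  intro num _
  unfold Spec_tongCT tongCT
  rw [pvA_eq num.natAbs num rfl 0, pvAlt_eq]
  ring
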